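-- pv_equiv track=rewrite | github.com/ldtcooper/reimagined-dollop | MU Game.py | III
-- ===== SOURCE A (Python) =====
-- def III(string):
--     #creates list for each possible new string to be entered into
--     finish_list = []
--     # iterates through string to find each 'III'
--     for elem in range(len(string)):
--         try:
--             if string[elem] == 'I' and string[elem + 1] == 'I' and string[elem + 2] == 'I':
--                 new_string = string[:elem] + 'U' + string[elem+3:]
--                 finish_list.append(new_string)
--         except:
--             continue
--     return finish_list
-- ===== SOURCE B (Python) =====
-- def III(string):
--     # different algorithm: run-length encode the string first, then read the
--     # matches off the runs: a maximal run of n 'I's contributes the n-2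
--     # (overlapping) replacement positions pos..pos+n-3, in order.
--     runs = []
--     for ch in string:
--         if runs and runs[-1][0] == ch:
--             runs[-1][1] += 1
--         else:
--             runs.append([ch, 1])
--     out = []
--     pos = 0
--     for ch, n in runs:
--         if ch == 'I':
--             for i in range(pos, pos + n - 2):
--                 out.append(string[:i] + 'U' + string[i + 3:])
--         pos += n
--     return out
-- ===== Notes on version B (the rewrite author's own statement) =====
-- stated objective: alternative
-- what changed: A tests three characters at every index of the string (with try/except at the end) and appends a replacement per hit; B first run-length encodes the string into maximal (char, count) runs and then reads the match positions off the runs: each run of n 'I's yields the n-2 overlapping replacement positions.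
import Mathlib
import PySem

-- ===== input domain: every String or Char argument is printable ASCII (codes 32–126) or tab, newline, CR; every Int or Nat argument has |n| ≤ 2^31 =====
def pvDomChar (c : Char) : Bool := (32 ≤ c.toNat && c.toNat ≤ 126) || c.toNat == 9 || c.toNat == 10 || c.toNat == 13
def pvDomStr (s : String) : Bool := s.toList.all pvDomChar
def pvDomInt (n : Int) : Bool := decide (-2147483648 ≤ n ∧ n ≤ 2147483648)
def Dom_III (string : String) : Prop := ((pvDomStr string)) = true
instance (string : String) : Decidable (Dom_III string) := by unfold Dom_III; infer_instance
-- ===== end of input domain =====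

-- B replaces A's per-index three-character scan (try/except at the string end) by a
-- run-length-encoding algorithm: encode the string into maximal (char, count) runs,
-- then each run of n 'I's yields the n-2 overlapping replacement positions.

-- ===== PORT A =====
-- string[:elem] + 'U' + string[elem+3:]
def IIIbuildA (cs : List Char) (elem : Int) : String :=
  String.ofList (PySem.List.slice cs none (some elem) ++ ['U'] ++ PySem.List.slice cs (some (elem + 3)) none)

def III (string : String) : List String :=
  (PySem.List.pyRange 0 (PySem.Str.len string) 1).foldl
    (fun finish_list elem =>
      -- A's try/except skips the append when string[elem+1]/string[elem+2] raise
      -- IndexError; the short-circuit `none ≠ some 'I'` checks below do exactly that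
      if PySem.List.pyGet? string.toList elem == some 'I'
          && PySem.List.pyGet? string.toList (elem + 1) == some 'I'
          && PySem.List.pyGet? string.toList (elem + 2) == some 'I' then
        finish_list ++ [IIIbuildA string.toList elem]
      else finish_list) []

-- ===== PORT B =====
-- one step of Source B's first loop: merge into the last run (runs[-1][1] += 1) or append [ch, 1]
def rleStep (rs : List (Char × Nat)) (ch : Char) : List (Char × Nat) :=
  match rs.getLast? with
  | some (c, k) => if c == ch then rs.dropLast ++ [(c, k + 1)] else rs ++ [(ch, 1)]
  | none => [(ch, 1)]

-- first pass of Source B: run-length encode the string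
def rle (cs : List Char) : List (Char × Nat) := cs.foldl rleStep []

-- string[:i] + 'U' + string[i+3:] with i a non-negative in-range index
-- (exact: Python slices with such bounds are take/drop)
def IIIbuildB (cs : List Char) (i : Nat) : String :=
  String.ofList (cs.take i ++ 'U' :: cs.drop (i + 3))

-- second pass of Source B: walk the runs keeping (pos, out);
-- range(pos, pos + n - 2) has max(0, n-2) elements, i.e. List.range' pos (n - 2) in Nat
def III_alt (string : String) : List String :=
  ((rle string.toList).foldl
    (fun (st : Nat × List String) r =>
      (st.1 + r.2,
        if r.1 == 'I' then
          st.2 ++ (List.range' st.1 (r.2 - 2)).map (IIIbuildB string.toList)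
        else st.2))
    (0, [])).2

-- ===== PRECONDITION & SPEC =====
def Spec_III (string : String) (out : List String) : Prop := out = III_alt string
instance (string : String) (out : List String) : Decidable (Spec_III string out) := by unfold Spec_III; infer_instance

-- ===== CLAIM (what is proved, stated in full; the proofs are below) =====
def Claim_equal_III : Prop := ∀ (string : String), Dom_III string → Spec_III string (III string)

-- ===== LEMMAS AND PROOFS =====

-- the match indices of a string, as A finds them
def Mlist (cs : List Char) : List Nat :=
  (List.range cs.length).filter (fun i => decide (['I', 'I', 'I'] <+: cs.drop i))

-- the match indices read off a run list starting at position pos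
def matchIdx : List (Char × Nat) → Nat → List Nat
  | [], _ => []
  | (c, n) :: rs, pos =>
      (if c = 'I' then List.range' pos (n - 2) else []) ++ matchIdx rs (pos + n)

theorem triple_prefix_iff (l : List Char) :
    ['I', 'I', 'I'] <+: l ↔ (l[0]? = some 'I' ∧ l[1]? = some 'I' ∧ l[2]? = some 'I') := by
  constructor
  · rintro ⟨u, rfl⟩
    refine ⟨?_, ?_, ?_⟩ <;> simp
  · intro h
    rcases l with _ | ⟨a, l⟩
    · simp at h
    rcases l with _ | ⟨b, l⟩
    · simp at h
    rcases l with _ | ⟨c, l⟩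
    · simp at h
    simp only [List.getElem?_cons_zero, List.getElem?_cons_succ, Option.some.injEq] at h
    obtain ⟨rfl, rfl, rfl⟩ := h
    exact ⟨l, rfl⟩

theorem cond_iff (cs : List Char) (i : Nat) :
    (cs[i]? = some 'I' ∧ cs[i + 1]? = some 'I' ∧ cs[i + 2]? = some 'I') ↔
      ['I', 'I', 'I'] <+: cs.drop i := by
  rw [triple_prefix_iff]
  simp [List.getElem?_drop]

theorem foldl_if_append {α β : Type} (c : α → Bool) (f : α → β) :
    ∀ (l : List α) (init : List β),
      l.foldl (fun acc i => if c i then acc ++ [f i] else acc) init =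
        init ++ (l.filter c).map f := by
  intro l
  induction l with
  | nil => simp
  | cons x xs ih =>
      intro init
      by_cases hx : c x = true <;> simp [List.foldl_cons, hx, ih]

-- A's result, characterised as filter-then-map over List.range
theorem III_eq_filter (string : String) :
    III string = (Mlist string.toList).map (fun (i : Nat) => IIIbuildA string.toList (i : Int)) := by
  unfold III Mlist
  rw [show PySem.Str.len string = (string.toList.length : Int) by simp,
    PySem.List.pyRange_zero_natCast, List.foldl_map, foldl_if_append, List.nil_append]
  congr 1
  apply List.filter_congr
  intro i _
  have := cond_iff string.toList i
  simp only [PySem.List.pyGet?_natCast]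
  rw [show ((i : Int) + 1) = ((i + 1 : Nat) : Int) by push_cast; ring,
    show ((i : Int) + 2) = ((i + 2 : Nat) : Int) by push_cast; ring]
  simp only [PySem.List.pyGet?_natCast]
  by_cases hP : ['I', 'I', 'I'] <+: string.toList.drop i
  · obtain ⟨h0, h1, h2⟩ := (cond_iff string.toList i).mpr hP
    simp [h0, h1, h2, hP]
  · simp only [hP, decide_false]
    have := (cond_iff string.toList i).not.mpr hP
    push_neg at this
    by_cases h0 : string.toList[i]? = some 'I' <;>
      by_cases h1 : string.toList[i + 1]? = some 'I' <;>
        by_cases h2 : string.toList[i + 2]? = some 'I' <;>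
          simp_all

theorem build_eq (cs : List Char) (i : Nat) :
    IIIbuildA cs (i : Int) = IIIbuildB cs i := by
  unfold IIIbuildA IIIbuildB
  rw [show ((i : Int) + 3) = ((i + 3 : Nat) : Int) by push_cast; ring,
    PySem.List.slice_to_natCast, PySem.List.slice_from_natCast]
  simp

-- B's second fold collects exactly (matchIdx (rle cs) pos).map (IIIbuildB cs)
theorem fold2_eq (cs : List Char) :
    ∀ (rs : List (Char × Nat)) (pos : Nat) (out : List String),
      (rs.foldl
        (fun (st : Nat × List String) r =>
          (st.1 + r.2,
            if r.1 == 'I' then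
              st.2 ++ (List.range' st.1 (r.2 - 2)).map (IIIbuildB cs)
            else st.2))
        (pos, out)).2 = out ++ (matchIdx rs pos).map (IIIbuildB cs) := by
  intro rs
  induction rs with
  | nil => simp [matchIdx]
  | cons r rs ih =>
      intro pos out
      obtain ⟨c, n⟩ := r
      rw [List.foldl_cons]
      by_cases hc : c = 'I'
      · have hb : (c == 'I') = true := by simp [hc]
        simp only [hb, if_true]
        rw [ih]
        simp [matchIdx, hc, List.append_assoc]
      · have hb : (c == 'I') = false := by simp [hc]
        simp only [hb, Bool.false_eq_true, if_false]
        rw [ih]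
        simp [matchIdx, hc]

theorem rleStep_ne_nil (rs : List (Char × Nat)) (c : Char) : rleStep rs c ≠ [] := by
  unfold rleStep
  rcases h : rs.getLast? with _ | ⟨d, k⟩ <;> simp
  split <;> simp

theorem rleStep_append (rs0 rs : List (Char × Nat)) (c : Char) (h : rs ≠ []) :
    rleStep (rs0 ++ rs) c = rs0 ++ rleStep rs c := by
  rcases hl : rs.getLast? with _ | ⟨d, k⟩
  · exact absurd (List.getLast?_eq_none_iff.mp hl) h
  · simp only [rleStep, List.getLast?_append, hl, Option.some_or]
    by_cases hdc : (d == c) = true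
    · simp only [hdc, if_true]
      rw [List.dropLast_append, if_neg (by simp [h]), List.append_assoc]
    · simp only [hdc, Bool.false_eq_true, if_false]
      rw [List.append_assoc]

theorem foldl_rleStep_append :
    ∀ (cs : List Char) (rs0 rs : List (Char × Nat)), rs ≠ [] →
      cs.foldl rleStep (rs0 ++ rs) = rs0 ++ cs.foldl rleStep rs := by
  intro cs
  induction cs with
  | nil => intro rs0 rs _; rfl
  | cons c cs ih =>
      intro rs0 rs h
      simp only [List.foldl_cons]
      rw [rleStep_append rs0 rs c h, ih rs0 _ (rleStep_ne_nil rs c)]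

theorem rleStep_merge (c : Char) (k : Nat) : rleStep [(c, k)] c = [(c, k + 1)] := by
  simp [rleStep]

theorem foldl_replicate (c : Char) :
    ∀ (n : Nat) (k : Nat) (cs : List Char),
      (List.replicate n c ++ cs).foldl rleStep [(c, k)] = cs.foldl rleStep [(c, k + n)] := by
  intro n
  induction n with
  | zero => intro k cs; simp
  | succ m ih =>
      intro k cs
      rw [List.replicate_succ]
      simp only [List.cons_append, List.foldl_cons, rleStep_merge]
      rw [ih (k + 1) cs]
      have hkm : k + 1 + m = k + (m + 1) := by omega
      rw [hkm]

theorem head?_dropWhile (p : Char → Bool) (l : List Char) (x : Char)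
    (h : (l.dropWhile p).head? = some x) : p x = false := by
  have := List.head?_dropWhile_not p l
  rw [h] at this
  exact this

theorem takeWhile_replicate (c : Char) (cs : List Char) :
    cs.takeWhile (· == c) = List.replicate (cs.takeWhile (· == c)).length c := by
  rw [List.eq_replicate_iff]
  refine ⟨rfl, ?_⟩
  intro b hb
  have := List.mem_takeWhile_imp hb
  simpa using this

theorem rle_cons (c : Char) (cs : List Char) :
    rle (c :: cs) =
      (c, 1 + (cs.takeWhile (· == c)).length) :: rle (cs.dropWhile (· == c)) := by
  unfold rle
  simp only [List.foldl_cons]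
  have h0 : rleStep [] c = [(c, 1)] := by simp [rleStep]
  rw [h0]
  conv_lhs => rw [show cs = cs.takeWhile (· == c) ++ cs.dropWhile (· == c) from
    (List.takeWhile_append_dropWhile).symm]
  rw [takeWhile_replicate c cs, foldl_replicate]
  rcases hrest : cs.dropWhile (· == c) with _ | ⟨r, rest'⟩
  · simp
  · have hr : (r == c) = false := by
      apply head?_dropWhile (· == c) cs
      rw [hrest]; rfl
    have hcr : (c == r) = false := by
      simp only [beq_eq_false_iff_ne, ne_eq] at hr ⊢
      exact fun he => hr he.symm
    simp only [List.foldl_cons]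
    have hstep : rleStep [(c, 1 + (cs.takeWhile (· == c)).length)] r =
        [(c, 1 + (cs.takeWhile (· == c)).length)] ++ [(r, 1)] := by
      simp [rleStep, hcr]
    rw [hstep, foldl_rleStep_append rest' _ [(r, 1)] (by simp)]
    simp [rleStep]

theorem filter_lt_range : ∀ (n k : Nat), k ≤ n →
    (List.range n).filter (fun i => decide (i < k)) = List.range k := by
  intro n
  induction n with
  | zero => intro k hk; interval_cases k; simp
  | succ m ih =>
      intro k hk
      rw [List.range_succ, List.filter_append]
      rcases Nat.lt_or_ge k (m + 1) with h | h
      · have hk' : k ≤ m := by omega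
        rw [ih k hk']
        have hm : ¬ m < k := by omega
        simp [hm]
      · have hk1 : k = m + 1 := by omega
        subst hk1
        have h1 : (List.range m).filter (fun i => decide (i < m + 1)) = List.range m := by
          apply List.filter_eq_self.mpr
          intro a ha
          simp only [List.mem_range] at ha
          simp only [decide_eq_true_eq]
          omega
        rw [h1]
        simp [List.range_succ]

-- the match positions of (replicate n c ++ rest) when rest does not start with c
theorem Mlist_split (c : Char) (n : Nat) (rest : List Char)
    (hn : 1 ≤ n) (hrest : rest.head? ≠ some c) :
    Mlist (List.replicate n c ++ rest) =
      (if c = 'I' then List.range (n - 2) else []) ++ (Mlist rest).map (· + n) := by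
  unfold Mlist
  rw [List.length_append, List.length_replicate, List.range_add, List.filter_append,
    List.filter_map]
  have hdrop : ∀ i : Nat, (List.replicate n c ++ rest).drop (n + i) = rest.drop i := by
    intro i
    rw [List.drop_append, List.drop_replicate, List.length_replicate,
      show n - (n + i) = 0 by omega, show n + i - n = i by omega]
    simp
  have h2 : ((List.range rest.length).filter
      ((fun i => decide (['I','I','I'] <+: (List.replicate n c ++ rest).drop i)) ∘ (fun x => n + x))).map
        (fun x => n + x) = (Mlist rest).map (· + n) := by
    unfold Mlist
    have : ((fun i => decide (['I','I','I'] <+: (List.replicate n c ++ rest).drop i)) ∘ (fun x => n + x)) =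
        fun i => decide (['I','I','I'] <+: rest.drop i) := by
      funext i
      simp [hdrop i]
    rw [this]
    apply List.map_congr_left
    intro i _
    omega
  rw [h2]
  congr 1
  -- first part: the matches inside the leading run
  have hget : ∀ i : Nat, i < n → ∀ j : Nat,
      ((List.replicate n c ++ rest).drop i)[j]? =
        if j < n - i then some c else rest[j - (n - i)]? := by
    intro i hi j
    rw [List.drop_append, List.drop_replicate, List.length_replicate,
      show i - n = 0 from by omega, List.drop_zero, List.getElem?_append,
      List.getElem?_replicate, List.length_replicate]
    by_cases hj : j < n - i
    · simp [hj]
    · simp [hj]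
  by_cases hc : c = 'I'
  · subst hc
    rw [if_pos rfl]
    rw [show (List.range (n - 2)) =
      (List.range n).filter (fun i => decide (i < n - 2)) from (filter_lt_range n (n - 2) (by omega)).symm]
    apply List.filter_congr
    intro i hi
    simp only [List.mem_range] at hi
    simp only [decide_eq_decide]
    rw [triple_prefix_iff]
    constructor
    · rintro ⟨h0, h1, h2⟩
      by_contra hlt
      have hni : n - i ≤ 2 := by omega
      rcases Nat.lt_or_ge (n - i) 2 with h' | h'
      · -- n - i = 1: second char is rest.head
        have hni1 : n - i = 1 := by omega
        rw [hget i hi 1, hni1, if_neg (by omega)] at h1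
        rcases rest with _ | ⟨x, xs⟩
        · simp at h1
        · simp at h1
          exact hrest (by simp [h1])
      · -- n - i = 2: third char is rest.head
        have hni2 : n - i = 2 := by omega
        rw [hget i hi 2, hni2, if_neg (by omega)] at h2
        rcases rest with _ | ⟨x, xs⟩
        · simp at h2
        · simp at h2
          exact hrest (by simp [h2])
    · intro hlt
      refine ⟨?_, ?_, ?_⟩ <;>
        · rw [hget i hi _, if_pos (by omega)]
  · rw [if_neg hc]
    apply List.filter_eq_nil_iff.mpr
    intro i hi
    simp only [List.mem_range] at hi
    simp only [decide_eq_true_eq]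
    rw [triple_prefix_iff]
    rintro ⟨h0, -, -⟩
    rw [hget i hi 0, if_pos (by omega)] at h0
    exact hc (Option.some.inj h0)

theorem matchIdx_rle :
    ∀ (N : Nat) (cs : List Char), cs.length ≤ N → ∀ (pos : Nat),
      matchIdx (rle cs) pos = (Mlist cs).map (· + pos) := by
  intro N
  induction N with
  | zero =>
      intro cs h pos
      have : cs = [] := List.length_eq_zero_iff.mp (by omega)
      subst this
      simp [rle, matchIdx, Mlist]
  | succ N ih =>
      intro cs h pos
      rcases cs with _ | ⟨c, cs'⟩
      · simp [rle, matchIdx, Mlist]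
      · rw [rle_cons]
        set m := (cs'.takeWhile (· == c)).length with hm
        set rest := cs'.dropWhile (· == c) with hrestdef
        have hlen : rest.length ≤ N := by
          have hd := List.length_dropWhile_le (· == c) cs'
          rw [← hrestdef] at hd
          simp only [List.length_cons] at h
          omega
        have hrest : rest.head? ≠ some c := by
          intro hh
          have := head?_dropWhile (· == c) cs' c hh
          simp at this
        have hsplit : c :: cs' = List.replicate (1 + m) c ++ rest := by
          conv_lhs => rw [show cs' = cs'.takeWhile (· == c) ++ rest from
            (List.takeWhile_append_dropWhile).symm]
          rw [takeWhile_replicate c cs', ← hm, Nat.add_comm 1 m, List.replicate_succ,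
            List.cons_append]
        rw [hsplit, Mlist_split c (1 + m) rest (by omega) hrest]
        simp only [matchIdx]
        rw [ih rest hlen (pos + (1 + m))]
        rw [List.map_append, List.map_map]
        congr 1
        · by_cases hc : c = 'I'
          · rw [if_pos hc, if_pos hc, List.range'_eq_map_range]
            apply List.map_congr_left
            intro i _
            omega
          · rw [if_neg hc, if_neg hc]; rfl
        · apply List.map_congr_left
          intro i _
          simp only [Function.comp]
          omega

-- ===== VERDICT (by name: the statement is the Claim_ definition above) =====
theorem III_spec : Claim_equal_III := by
  intro string _
  unfold Spec_III III_alt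
  rw [fold2_eq string.toList (rle string.toList) 0 [], List.nil_append,
    matchIdx_rle string.toList.length string.toList le_rfl 0, III_eq_filter, List.map_map]
  apply List.map_congr_left
  intro i _
  simp only [Function.comp]
  rw [show i + 0 = i from rfl, build_eq]
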